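-- pv_equiv track=rewrite | github.com/cristinaimprota/Investigating-Training-Data-s-Role | 1_dataset_preprocessing_and_filtering/1_extract_data.py | find_and_remove_doc
-- ===== SOURCE A (Python) =====
-- def find_and_remove_doc(function_lines):
--     start_doc_line, end_doc_line = 0, 0
--     flag_signature_end = False
--     flag_comment = False
--     for i in range(len(function_lines)):
--         line = function_lines[i]
--         if not flag_signature_end:
--             if line.strip().endswith(':'):
--                 flag_signature_end = True
--             continue
--
--         if not flag_comment and line.strip() != '' and not line.strip().startswith('"""'):
--             # missing doc
--             break
--
--         if not flag_comment and line.strip().startswith('"""'):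
--                 flag_comment = True
--                 start_doc_line = i
--                 if line.strip().endswith('"""') and len(line.strip()) > 3:
--                     end_doc_line = i
--                     break
--         elif flag_comment and (line.strip().startswith('"""') or line.strip().endswith('"""')):
--                 end_doc_line = i
--                 break
--
--     if start_doc_line != 0 and end_doc_line != 0:
--         funcion_without_doc = function_lines[:start_doc_line] + function_lines[end_doc_line+1:]
--         return funcion_without_doc, function_lines[start_doc_line : end_doc_line+1]
--     return [], []
-- ===== SOURCE B (Python) =====
-- def find_and_remove_doc(function_lines):
--     stripped = [l.strip() for l in function_lines]
--     colon_flags = [s.endswith(':') for s in stripped]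
--     if True not in colon_flags:
--         return [], []
--     sig = colon_flags.index(True)
--     body = stripped[sig + 1:]
--     nonblank_flags = [s != '' for s in body]
--     if True not in nonblank_flags:
--         return [], []
--     j = nonblank_flags.index(True)
--     first = body[j]
--     if not first.startswith('"""'):
--         return [], []
--     start = sig + 1 + j
--     if first.endswith('"""') and len(first) > 3:
--         end = start
--     else:
--         closer_flags = [s.startswith('"""') or s.endswith('"""') for s in body[j + 1:]]
--         if True not in closer_flags:
--             return [], []
--         end = start + 1 + closer_flags.index(True)
--     return function_lines[:start] + function_lines[end + 1:], function_lines[start:end + 1]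
-- ===== Notes on version B (the rewrite author's own statement) =====
-- stated objective: alternative
-- what changed: Replaces A's stateful break-driven indexed scan (four mutable state variables and post-processed indices) with a declarative pipeline: map the stripped lines to boolean flag lists and locate the signature line, the first non-blank body line and the docstring closing line with membership tests plus first-index (.index) queries, then slice once.
import Mathlib
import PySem

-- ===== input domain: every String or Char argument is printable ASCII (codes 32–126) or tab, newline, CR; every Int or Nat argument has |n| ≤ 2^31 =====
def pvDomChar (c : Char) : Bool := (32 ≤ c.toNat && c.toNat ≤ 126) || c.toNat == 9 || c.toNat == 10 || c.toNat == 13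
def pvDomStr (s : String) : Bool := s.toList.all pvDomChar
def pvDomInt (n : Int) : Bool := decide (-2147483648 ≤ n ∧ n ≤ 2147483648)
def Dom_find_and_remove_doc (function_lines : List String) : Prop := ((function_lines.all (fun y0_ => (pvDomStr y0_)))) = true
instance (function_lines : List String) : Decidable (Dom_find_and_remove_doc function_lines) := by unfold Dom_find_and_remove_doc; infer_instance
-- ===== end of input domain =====

-- B replaces A's stateful indexed scan (four mutable state variables, break-driven) with a
-- declarative pipeline: map the lines to boolean flag lists and locate the signature line,
-- the docstring start and the closing line with first-index (.index) queries; same O(n) cost.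

-- ===== PORT A =====
-- A's single for-loop over range(len(function_lines)) with state
-- (start_doc_line, end_doc_line, flag_signature_end, flag_comment); breaks return the state.
-- (The loop is written with a fuel argument initialised to the list length — enough for every iteration.)
def findA_loop (lines : List String) (fuel i : Nat) (startDoc endDoc : Int)
    (flagSig flagComment : Bool) : Int × Int :=
  match fuel with
  | 0 => (startDoc, endDoc)
  | fuel + 1 =>
    if _h : i < lines.length then
      let s := PySem.Str.strip lines[i]
      if !flagSig then
        findA_loop lines fuel (i+1) startDoc endDoc
          (if PySem.Str.endswith s ":" then true else flagSig) flagComment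
      else if !flagComment && (s != "") && !(PySem.Str.startswith s "\"\"\"") then
        (startDoc, endDoc)                      -- missing doc: break
      else if !flagComment && PySem.Str.startswith s "\"\"\"" then
        if PySem.Str.endswith s "\"\"\"" && PySem.Str.len s > 3 then
          ((i : Int), (i : Int))                -- single-line docstring: break
        else
          findA_loop lines fuel (i+1) (i : Int) endDoc flagSig true
      else if flagComment && (PySem.Str.startswith s "\"\"\"" || PySem.Str.endswith s "\"\"\"") then
        (startDoc, (i : Int))                   -- closing line: break
      else
        findA_loop lines fuel (i+1) startDoc endDoc flagSig flagComment
    else (startDoc, endDoc)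

def find_and_remove_doc (function_lines : List String) : List String × List String :=
  let p := findA_loop function_lines function_lines.length 0 0 0 false false
  if p.1 ≠ 0 ∧ p.2 ≠ 0 then
    (PySem.List.slice function_lines none (some p.1) ++
       PySem.List.slice function_lines (some (p.2 + 1)) none,
     PySem.List.slice function_lines (some p.1) (some (p.2 + 1)))
  else ([], [])

-- ===== PORT B =====
-- Source B: boolean flag lists + first-index (.index) queries; 'True not in flags' + '.index(True)'
-- is ported as a match on PySem.List.index? flags true (none ⟺ True not in flags).
def find_and_remove_doc_alt (function_lines : List String) : List String × List String :=
  let stripped := function_lines.map PySem.Str.strip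
  let colonFlags := stripped.map (fun s => PySem.Str.endswith s ":")
  match PySem.List.index? colonFlags true with
  | none => ([], [])
  | some sig =>
    let body := PySem.List.slice stripped (some ((sig : Int) + 1)) none
    let nonblankFlags := body.map (fun s => s != "")
    match PySem.List.index? nonblankFlags true with
    | none => ([], [])
    | some j =>
      let first := PySem.List.pyGetD body (j : Int) ""
      if !(PySem.Str.startswith first "\"\"\"") then ([], [])
      else
        let start := sig + 1 + j
        if PySem.Str.endswith first "\"\"\"" && decide (PySem.Str.len first > 3) then
          (PySem.List.slice function_lines none (some (start : Int)) ++
             PySem.List.slice function_lines (some ((start : Int) + 1)) none,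
           PySem.List.slice function_lines (some (start : Int)) (some ((start : Int) + 1)))
        else
          let closerFlags := (PySem.List.slice body (some ((j : Int) + 1)) none).map
            (fun s => PySem.Str.startswith s "\"\"\"" || PySem.Str.endswith s "\"\"\"")
          match PySem.List.index? closerFlags true with
          | none => ([], [])
          | some k =>
            let e := start + 1 + k
            (PySem.List.slice function_lines none (some (start : Int)) ++
               PySem.List.slice function_lines (some ((e : Int) + 1)) none,
             PySem.List.slice function_lines (some (start : Int)) (some ((e : Int) + 1)))

-- ===== PRECONDITION & SPEC =====
def Spec_find_and_remove_doc (function_lines : List String) (out : List String × List String) : Prop := out = find_and_remove_doc_alt function_lines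
instance (function_lines : List String) (out : List String × List String) : Decidable (Spec_find_and_remove_doc function_lines out) := by unfold Spec_find_and_remove_doc; infer_instance

-- ===== CLAIM =====
def Claim_equal_find_and_remove_doc : Prop := ∀ (function_lines : List String), Dom_find_and_remove_doc function_lines → Spec_find_and_remove_doc function_lines (find_and_remove_doc function_lines)

-- ===== LEMMAS AND PROOFS =====

-- A's post-processing of the loop's final (start_doc_line, end_doc_line)
def postA (lines : List String) (p : Int × Int) : List String × List String :=
  if p.1 ≠ 0 ∧ p.2 ≠ 0 then
    (PySem.List.slice lines none (some p.1) ++ PySem.List.slice lines (some (p.2 + 1)) none,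
     PySem.List.slice lines (some p.1) (some (p.2 + 1)))
  else ([], [])

-- the pair of slices both programs return once start/end indices are known
def outPair (lines : List String) (s e : Nat) : List String × List String :=
  (PySem.List.slice lines none (some (s : Int)) ++
     PySem.List.slice lines (some ((e : Int) + 1)) none,
   PySem.List.slice lines (some (s : Int)) (some ((e : Int) + 1)))

def closerP (s : String) : Bool := PySem.Str.startswith s "\"\"\"" || PySem.Str.endswith s "\"\"\""

-- B's three first-index queries, re-indexed to an absolute position i (proof-side views of Source B)
def phase3 (lines stripped : List String) (st i : Nat) : List String × List String :=
  match PySem.List.index? ((stripped.drop i).map closerP) true with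
  | none => ([], [])
  | some k => outPair lines st (i + k)

def phase2 (lines stripped : List String) (i : Nat) : List String × List String :=
  match PySem.List.index? ((stripped.drop i).map (fun s => s != "")) true with
  | none => ([], [])
  | some j =>
    let first := (stripped.drop i).getD j ""
    if !(PySem.Str.startswith first "\"\"\"") then ([], [])
    else if PySem.Str.endswith first "\"\"\"" && decide (PySem.Str.len first > 3) then
      outPair lines (i + j) (i + j)
    else phase3 lines stripped (i + j) (i + j + 1)

def phase1 (lines stripped : List String) (i : Nat) : List String × List String :=
  match PySem.List.index? ((stripped.drop i).map (fun s => PySem.Str.endswith s ":")) true with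
  | none => ([], [])
  | some d => phase2 lines stripped (i + d + 1)

theorem postA_pos (lines : List String) (s e : Nat) (hs : 1 ≤ s) (he : 1 ≤ e) :
    postA lines ((s : Int), (e : Int)) = outPair lines s e := by
  have h1 : (s : Int) ≠ 0 := by exact_mod_cast Nat.one_le_iff_ne_zero.mp hs
  have h2 : (e : Int) ≠ 0 := by exact_mod_cast Nat.one_le_iff_ne_zero.mp he
  unfold postA outPair
  split_ifs with hcond
  · rfl
  · exact absurd ⟨h1, h2⟩ hcond

theorem dropStrip (lines : List String) (i : Nat) (h : i < lines.length) :
    (lines.map PySem.Str.strip).drop i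
      = PySem.Str.strip lines[i] :: (lines.map PySem.Str.strip).drop (i+1) := by
  rw [List.drop_eq_getElem_cons (by simpa using h)]
  simp

theorem drop_map_nil (lines : List String) (i : Nat) (h : ¬ i < lines.length) :
    (lines.map PySem.Str.strip).drop i = [] :=
  List.drop_eq_nil_of_le (by simpa using Nat.le_of_not_lt h)

-- step equations for A's loop -------------------------------------------------
theorem A_base (lines : List String) (fuel i : Nat) (sd ed : Int) (fs fc : Bool)
    (h : ¬ i < lines.length) : findA_loop lines fuel i sd ed fs fc = (sd, ed) := by
  cases fuel
  · rw [findA_loop]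
  · rw [findA_loop]; simp [h]

theorem A_sig (lines : List String) (fuel i : Nat) (sd ed : Int) (fc : Bool)
    (h : i < lines.length) :
    findA_loop lines (fuel+1) i sd ed false fc =
      findA_loop lines fuel (i+1) sd ed
        (if PySem.Str.endswith (PySem.Str.strip lines[i]) ":" then true else false) fc := by
  rw [findA_loop]; simp [h]

theorem A_none_miss (lines : List String) (fuel i : Nat) (sd ed : Int)
    (h : i < lines.length)
    (hne : PySem.Str.strip lines[i] ≠ "")
    (hns : PySem.Str.startswith (PySem.Str.strip lines[i]) "\"\"\"" = false) :
    findA_loop lines (fuel+1) i sd ed true false = (sd, ed) := by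
  rw [findA_loop]; simp only [dif_pos h]; simp_all

theorem A_none_empty (lines : List String) (fuel i : Nat) (sd ed : Int)
    (h : i < lines.length) (he : PySem.Str.strip lines[i] = "") :
    findA_loop lines (fuel+1) i sd ed true false = findA_loop lines fuel (i+1) sd ed true false := by
  rw [findA_loop]
  simp only [dif_pos h]
  simp_all
  intro hx
  exact absurd hx (by decide)

theorem A_none_single (lines : List String) (fuel i : Nat) (sd ed : Int)
    (h : i < lines.length)
    (hs : PySem.Str.startswith (PySem.Str.strip lines[i]) "\"\"\"" = true)
    (hend : (PySem.Str.endswith (PySem.Str.strip lines[i]) "\"\"\"" &&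
             decide (PySem.Str.len (PySem.Str.strip lines[i]) > 3)) = true) :
    findA_loop lines (fuel+1) i sd ed true false = ((i : Int), (i : Int)) := by
  rw [findA_loop]; simp only [dif_pos h]; simp_all

theorem A_none_open (lines : List String) (fuel i : Nat) (sd ed : Int)
    (h : i < lines.length)
    (hs : PySem.Str.startswith (PySem.Str.strip lines[i]) "\"\"\"" = true)
    (hend : (PySem.Str.endswith (PySem.Str.strip lines[i]) "\"\"\"" &&
             decide (PySem.Str.len (PySem.Str.strip lines[i]) > 3)) = false) :
    findA_loop lines (fuel+1) i sd ed true false = findA_loop lines fuel (i+1) (i : Int) ed true true := by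
  rw [findA_loop]; simp only [dif_pos h]; simp_all

theorem A_open_close (lines : List String) (fuel i : Nat) (sd ed : Int)
    (h : i < lines.length)
    (hc : (PySem.Str.startswith (PySem.Str.strip lines[i]) "\"\"\"" ||
           PySem.Str.endswith (PySem.Str.strip lines[i]) "\"\"\"") = true) :
    findA_loop lines (fuel+1) i sd ed true true = (sd, (i : Int)) := by
  rw [findA_loop]; simp only [dif_pos h]; simp_all

theorem A_open_skip (lines : List String) (fuel i : Nat) (sd ed : Int)
    (h : i < lines.length)
    (hc : (PySem.Str.startswith (PySem.Str.strip lines[i]) "\"\"\"" ||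
           PySem.Str.endswith (PySem.Str.strip lines[i]) "\"\"\"") = false) :
    findA_loop lines (fuel+1) i sd ed true true = findA_loop lines fuel (i+1) sd ed true true := by
  rw [findA_loop]
  simp only [dif_pos h]
  simp_all

-- step equations for B's phase views ------------------------------------------
theorem phase3_nil (lines : List String) (st i : Nat) (h : ¬ i < lines.length) :
    phase3 lines (lines.map PySem.Str.strip) st i = ([], []) := by
  unfold phase3
  rw [drop_map_nil lines i h]
  simp

theorem phase3_stop (lines : List String) (st i : Nat) (h : i < lines.length)
    (hc : closerP (PySem.Str.strip lines[i]) = true) :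
    phase3 lines (lines.map PySem.Str.strip) st i = outPair lines st i := by
  unfold phase3
  rw [dropStrip lines i h, List.map_cons, hc, PySem.List.index?_cons_self]
  simp

theorem phase3_skip (lines : List String) (st i : Nat) (h : i < lines.length)
    (hc : closerP (PySem.Str.strip lines[i]) = false) :
    phase3 lines (lines.map PySem.Str.strip) st i
      = phase3 lines (lines.map PySem.Str.strip) st (i+1) := by
  unfold phase3
  rw [dropStrip lines i h, List.map_cons, hc,
    PySem.List.index?_cons_of_ne _ (by decide)]
  cases PySem.List.index? (((lines.map PySem.Str.strip).drop (i+1)).map closerP) true with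
  | none => rfl
  | some k =>
    simp only [Option.map_some]
    have : i + (k + 1) = i + 1 + k := by omega
    rw [this]

theorem phase2_nil (lines : List String) (i : Nat) (h : ¬ i < lines.length) :
    phase2 lines (lines.map PySem.Str.strip) i = ([], []) := by
  unfold phase2
  rw [drop_map_nil lines i h]
  simp

theorem phase2_empty (lines : List String) (i : Nat) (h : i < lines.length)
    (he : PySem.Str.strip lines[i] = "") :
    phase2 lines (lines.map PySem.Str.strip) i
      = phase2 lines (lines.map PySem.Str.strip) (i+1) := by
  unfold phase2
  rw [dropStrip lines i h, List.map_cons]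
  have hne : (PySem.Str.strip lines[i] != "") = false := by simp [he]
  rw [hne, PySem.List.index?_cons_of_ne _ (by decide)]
  cases PySem.List.index? (((lines.map PySem.Str.strip).drop (i+1)).map (fun s => s != "")) true with
  | none => rfl
  | some j =>
    simp only [Option.map_some, List.getD_cons_succ]
    have h1 : i + (j + 1) = i + 1 + j := by omega
    rw [h1]

theorem phase2_hit (lines : List String) (i : Nat) (h : i < lines.length)
    (hne : PySem.Str.strip lines[i] ≠ "") :
    phase2 lines (lines.map PySem.Str.strip) i
      = (let first := PySem.Str.strip lines[i]
         if !(PySem.Str.startswith first "\"\"\"") then ([], [])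
         else if PySem.Str.endswith first "\"\"\"" && decide (PySem.Str.len first > 3) then
           outPair lines i i
         else phase3 lines (lines.map PySem.Str.strip) i (i + 1)) := by
  unfold phase2
  rw [dropStrip lines i h, List.map_cons]
  have ht : (PySem.Str.strip lines[i] != "") = true := by simpa using hne
  rw [ht, PySem.List.index?_cons_self]
  simp

theorem phase1_nil (lines : List String) (i : Nat) (h : ¬ i < lines.length) :
    phase1 lines (lines.map PySem.Str.strip) i = ([], []) := by
  unfold phase1
  rw [drop_map_nil lines i h]
  simp

theorem phase1_hit (lines : List String) (i : Nat) (h : i < lines.length)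
    (he : PySem.Str.endswith (PySem.Str.strip lines[i]) ":" = true) :
    phase1 lines (lines.map PySem.Str.strip) i
      = phase2 lines (lines.map PySem.Str.strip) (i+1) := by
  unfold phase1
  rw [dropStrip lines i h, List.map_cons, he, PySem.List.index?_cons_self]

theorem phase1_skip (lines : List String) (i : Nat) (h : i < lines.length)
    (he : PySem.Str.endswith (PySem.Str.strip lines[i]) ":" = false) :
    phase1 lines (lines.map PySem.Str.strip) i
      = phase1 lines (lines.map PySem.Str.strip) (i+1) := by
  unfold phase1
  rw [dropStrip lines i h, List.map_cons, he,
    PySem.List.index?_cons_of_ne _ (by decide)]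
  cases PySem.List.index? (((lines.map PySem.Str.strip).drop (i+1)).map
      (fun s => PySem.Str.endswith s ":")) true with
  | none => rfl
  | some d =>
    simp only [Option.map_some]
    have : i + (d + 1) + 1 = i + 1 + d + 1 := by omega
    rw [this]

-- B's port equals the absolute-index phase view at position 0
theorem alt_eq (lines : List String) :
    find_and_remove_doc_alt lines = phase1 lines (lines.map PySem.Str.strip) 0 := by
  simp only [find_and_remove_doc_alt, phase1, List.drop_zero]
  cases hsig : PySem.List.index? ((lines.map PySem.Str.strip).map
      (fun s => PySem.Str.endswith s ":")) true with
  | none => rfl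
  | some sig =>
    simp only [Nat.zero_add]
    have hbody : PySem.List.slice (lines.map PySem.Str.strip) (some ((sig : Int) + 1)) none
        = (lines.map PySem.Str.strip).drop (sig + 1) := by
      have : ((sig : Int) + 1) = ((sig + 1 : Nat) : Int) := by push_cast; ring
      rw [this, PySem.List.slice_from_natCast]
    rw [hbody]
    unfold phase2
    cases hj : PySem.List.index? (((lines.map PySem.Str.strip).drop (sig + 1)).map
        (fun s => s != "")) true with
    | none => rfl
    | some j =>
      simp only [PySem.List.pyGetD_natCast]
      unfold phase3
      have hclo : PySem.List.slice ((lines.map PySem.Str.strip).drop (sig + 1))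
          (some ((j : Int) + 1)) none
          = (lines.map PySem.Str.strip).drop (sig + 1 + j + 1) := by
        have : ((j : Int) + 1) = ((j + 1 : Nat) : Int) := by push_cast; ring
        rw [this, PySem.List.slice_from_natCast, List.drop_drop]
        have : sig + 1 + (j + 1) = sig + 1 + j + 1 := by omega
        rw [this]
      rw [hclo]
      rfl

-- A's loop with the comment open equals phase3 ---------------------------------
theorem LA3 (lines : List String) : ∀ fuel i st : Nat, lines.length - i ≤ fuel → 1 ≤ st → 1 ≤ i →
    postA lines (findA_loop lines fuel i (st : Int) 0 true true)
      = phase3 lines (lines.map PySem.Str.strip) st i := by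
  intro fuel
  induction fuel with
  | zero =>
    intro i st hA hst hi
    have hge : ¬ i < lines.length := by omega
    rw [A_base _ _ _ _ _ _ _ hge, phase3_nil _ _ _ hge]
    simp [postA]
  | succ fuel ih =>
    intro i st hA hst hi
    by_cases h : i < lines.length
    · by_cases hc : closerP (PySem.Str.strip lines[i]) = true
      · rw [A_open_close _ _ _ _ _ h hc, phase3_stop _ _ _ h hc]
        exact postA_pos lines st i hst hi
      · have hc' : closerP (PySem.Str.strip lines[i]) = false := by simpa using hc
        rw [A_open_skip _ _ _ _ _ h hc', phase3_skip _ _ _ h hc']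
        exact ih (i+1) st (by omega) hst (by omega)
    · rw [A_base _ _ _ _ _ _ _ h, phase3_nil _ _ _ h]
      simp [postA]

-- A's loop after the signature, before the docstring, equals phase2 ------------
theorem LA2 (lines : List String) : ∀ fuel i : Nat, lines.length - i ≤ fuel → 1 ≤ i →
    postA lines (findA_loop lines fuel i 0 0 true false)
      = phase2 lines (lines.map PySem.Str.strip) i := by
  intro fuel
  induction fuel with
  | zero =>
    intro i hA hi
    have hge : ¬ i < lines.length := by omega
    rw [A_base _ _ _ _ _ _ _ hge, phase2_nil _ _ hge]
    simp [postA]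
  | succ fuel ih =>
    intro i hA hi
    by_cases h : i < lines.length
    · by_cases he : PySem.Str.strip lines[i] = ""
      · rw [A_none_empty _ _ _ _ _ h he, phase2_empty _ _ h he]
        exact ih (i+1) (by omega) (by omega)
      · rw [phase2_hit _ _ h he]
        by_cases hs : PySem.Str.startswith (PySem.Str.strip lines[i]) "\"\"\"" = true
        · by_cases hend : (PySem.Str.endswith (PySem.Str.strip lines[i]) "\"\"\"" &&
              decide (PySem.Str.len (PySem.Str.strip lines[i]) > 3)) = true
          · rw [A_none_single _ _ _ _ _ h hs hend]
            simp only [hs, hend]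
            simpa using postA_pos lines i i hi hi
          · have hend' := (by simpa using hend :
              (PySem.Str.endswith (PySem.Str.strip lines[i]) "\"\"\"" &&
               decide (PySem.Str.len (PySem.Str.strip lines[i]) > 3)) = false)
            rw [A_none_open _ _ _ _ _ h hs hend']
            simp only [hs, hend']
            simpa using LA3 lines fuel (i+1) i (by omega) hi (by omega)
        · have hs' : PySem.Str.startswith (PySem.Str.strip lines[i]) "\"\"\"" = false := by
            simpa using hs
          rw [A_none_miss _ _ _ _ _ h he hs']
          simp only [hs']
          simp [postA]
    · rw [A_base _ _ _ _ _ _ _ h, phase2_nil _ _ h]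
      simp [postA]

-- A's loop before the signature equals phase1 ----------------------------------
theorem LA1 (lines : List String) : ∀ fuel i : Nat, lines.length - i ≤ fuel →
    postA lines (findA_loop lines fuel i 0 0 false false)
      = phase1 lines (lines.map PySem.Str.strip) i := by
  intro fuel
  induction fuel with
  | zero =>
    intro i hA
    have hge : ¬ i < lines.length := by omega
    rw [A_base _ _ _ _ _ _ _ hge, phase1_nil _ _ hge]
    simp [postA]
  | succ fuel ih =>
    intro i hA
    by_cases h : i < lines.length
    · rw [A_sig _ _ _ _ _ _ h]
      by_cases he : PySem.Str.endswith (PySem.Str.strip lines[i]) ":" = true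
      · rw [he, if_pos rfl, phase1_hit _ _ h he]
        exact LA2 lines fuel (i+1) (by omega) (by omega)
      · have he' : PySem.Str.endswith (PySem.Str.strip lines[i]) ":" = false := by simpa using he
        rw [he', if_neg (by simp), phase1_skip _ _ h he']
        exact ih (i+1) (by omega)
    · rw [A_base _ _ _ _ _ _ _ h, phase1_nil _ _ h]
      simp [postA]

-- ===== VERDICT =====
theorem find_and_remove_doc_spec : Claim_equal_find_and_remove_doc := by
  intro lines _
  unfold Spec_find_and_remove_doc
  rw [alt_eq]
  have h := LA1 lines lines.length 0 (by omega)
  calc find_and_remove_doc lines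
      = postA lines (findA_loop lines lines.length 0 0 0 false false) := rfl
    _ = phase1 lines (lines.map PySem.Str.strip) 0 := h
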